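-- pv_equiv track=rewrite | github.com/Noxville/advent-of-code-2022 | 23/main1.py | proposal_direction
-- ===== SOURCE A (Python) =====
-- def mv_n(ex, ey, elves):
--     if all([(ex - 1, ey - 1) not in elves, (ex, ey - 1) not in elves, (ex + 1, ey - 1) not in elves]):
--         return ex, ey - 1
--     return None
--
-- def mv_s(ex, ey, elves):
--     if all([(ex - 1, ey + 1) not in elves, (ex, ey + 1) not in elves, (ex + 1, ey + 1) not in elves]):
--         return ex, ey + 1
--     return None
--
-- def mv_w(ex, ey, elves):
--     if all([(ex - 1, ey - 1) not in elves, (ex - 1, ey) not in elves, (ex - 1, ey + 1) not in elves]):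
--         return ex - 1, ey
--
-- def mv_e(ex, ey, elves):
--     if all([(ex + 1, ey - 1) not in elves, (ex + 1, ey) not in elves, (ex + 1, ey + 1) not in elves]):
--         return ex + 1, ey
--
-- def proposal_direction(ex, ey, elves, r):
--     opts = {
--         0: [mv_n(ex, ey, elves), mv_s(ex, ey, elves), mv_w(ex, ey, elves), mv_e(ex, ey, elves), (ex, ey)],
--         1: [mv_s(ex, ey, elves), mv_w(ex, ey, elves), mv_e(ex, ey, elves), mv_n(ex, ey, elves), (ex, ey)],
--         2: [mv_w(ex, ey, elves), mv_e(ex, ey, elves), mv_n(ex, ey, elves), mv_s(ex, ey, elves), (ex, ey)],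
--         3: [mv_e(ex, ey, elves), mv_n(ex, ey, elves), mv_s(ex, ey, elves), mv_w(ex, ey, elves), (ex, ey)],
--     }[r % 4]
--     return [_ for _ in opts if _ is not None][0]
-- ===== SOURCE B (Python) =====
-- def proposal_direction(ex, ey, elves, r):
--     # One pass over elves: classify each elf into the 8 neighbor-occupancy flags,
--     # then pick the move from a boolean table by rotated index arithmetic.
--     nw = n = ne = w = e = sw = s = se = False
--     for (x, y) in elves:
--         dx = x - ex
--         dy = y - ey
--         if dx == -1:
--             if dy == -1:
--                 nw = True
--             elif dy == 0:
--                 w = True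
--             elif dy == 1:
--                 sw = True
--         elif dx == 0:
--             if dy == -1:
--                 n = True
--             elif dy == 1:
--                 s = True
--         elif dx == 1:
--             if dy == -1:
--                 ne = True
--             elif dy == 0:
--                 e = True
--             elif dy == 1:
--                 se = True
--     free = [not (nw or n or ne), not (sw or s or se), not (nw or w or sw), not (ne or e or se)]
--     moves = [(ex, ey - 1), (ex, ey + 1), (ex - 1, ey), (ex + 1, ey)]
--     k = r % 4
--     for i in range(4):
--         j = (k + i) % 4
--         if free[j]:
--             return moves[j]
--     return (ex, ey)
-- ===== Notes on version B (the rewrite author's own statement) =====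
-- stated objective: alternative
-- what changed: Instead of A's twelve membership scans of elves (four mv_* helpers, dict of eagerly built candidate lists, filter None, take [0]), B makes one pass over elves classifying each elf into eight neighbor-occupancy flags, then selects the move by boolean logic over those flags with rotated index arithmetic (k+i)%4.
import Mathlib
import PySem

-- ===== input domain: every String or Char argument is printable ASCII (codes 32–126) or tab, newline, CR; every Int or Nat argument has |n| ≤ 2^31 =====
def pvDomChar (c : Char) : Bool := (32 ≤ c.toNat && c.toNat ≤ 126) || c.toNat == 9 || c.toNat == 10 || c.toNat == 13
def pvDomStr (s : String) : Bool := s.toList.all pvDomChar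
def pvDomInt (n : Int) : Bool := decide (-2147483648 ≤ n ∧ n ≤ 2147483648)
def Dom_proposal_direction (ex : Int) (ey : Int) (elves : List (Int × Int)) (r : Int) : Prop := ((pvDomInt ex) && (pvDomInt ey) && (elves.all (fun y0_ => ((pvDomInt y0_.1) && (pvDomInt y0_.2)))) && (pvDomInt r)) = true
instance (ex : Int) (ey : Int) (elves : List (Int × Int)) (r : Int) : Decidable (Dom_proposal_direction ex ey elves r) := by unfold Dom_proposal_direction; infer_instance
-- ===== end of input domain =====

-- B replaces A's twelve membership scans (four mv_* helpers, dict of candidate lists, filter-None,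
-- take [0]) with ONE pass over elves building eight neighbor-occupancy flags, then pure boolean
-- selection with rotated index arithmetic (objective: alternative).

-- ===== PORT A =====
def mvN (ex ey : Int) (elves : List (Int × Int)) : Option (Int × Int) :=
  if !(elves.contains (ex - 1, ey - 1)) && !(elves.contains (ex, ey - 1)) && !(elves.contains (ex + 1, ey - 1))
  then some (ex, ey - 1) else none

def mvS (ex ey : Int) (elves : List (Int × Int)) : Option (Int × Int) :=
  if !(elves.contains (ex - 1, ey + 1)) && !(elves.contains (ex, ey + 1)) && !(elves.contains (ex + 1, ey + 1))
  then some (ex, ey + 1) else none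

def mvW (ex ey : Int) (elves : List (Int × Int)) : Option (Int × Int) :=
  if !(elves.contains (ex - 1, ey - 1)) && !(elves.contains (ex - 1, ey)) && !(elves.contains (ex - 1, ey + 1))
  then some (ex - 1, ey) else none

def mvE (ex ey : Int) (elves : List (Int × Int)) : Option (Int × Int) :=
  if !(elves.contains (ex + 1, ey - 1)) && !(elves.contains (ex + 1, ey)) && !(elves.contains (ex + 1, ey + 1))
  then some (ex + 1, ey) else none

def proposal_direction (ex : Int) (ey : Int) (elves : List (Int × Int)) (r : Int) : Int × Int :=
  -- the dict lookup keyed by r % 4 ∈ {0,1,2,3} (never a KeyError: 0 ≤ r % 4 < 4)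
  let key := PySem.Int.mod r 4
  let opts : List (Option (Int × Int)) :=
    if key = 0 then [mvN ex ey elves, mvS ex ey elves, mvW ex ey elves, mvE ex ey elves, some (ex, ey)]
    else if key = 1 then [mvS ex ey elves, mvW ex ey elves, mvE ex ey elves, mvN ex ey elves, some (ex, ey)]
    else if key = 2 then [mvW ex ey elves, mvE ex ey elves, mvN ex ey elves, mvS ex ey elves, some (ex, ey)]
    else [mvE ex ey elves, mvN ex ey elves, mvS ex ey elves, mvW ex ey elves, some (ex, ey)]
  -- [_ for _ in opts if _ is not None][0]; the list ends in some (ex, ey) so [0] never raises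
  (opts.filterMap id).headD (ex, ey)

-- ===== PORT B =====
-- the body of Source B's for-loop over elves: classify one elf into the 8 flags (nw,n,ne,w,e,sw,s,se)
def pdStep (ex ey : Int) (f : Bool × Bool × Bool × Bool × Bool × Bool × Bool × Bool)
    (p : Int × Int) : Bool × Bool × Bool × Bool × Bool × Bool × Bool × Bool :=
  let (nw, n, ne, w, e, sw, s, se) := f
  let dx := p.1 - ex
  let dy := p.2 - ey
  if dx = -1 then
    if dy = -1 then (true, n, ne, w, e, sw, s, se)
    else if dy = 0 then (nw, n, ne, true, e, sw, s, se)
    else if dy = 1 then (nw, n, ne, w, e, true, s, se)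
    else f
  else if dx = 0 then
    if dy = -1 then (nw, true, ne, w, e, sw, s, se)
    else if dy = 1 then (nw, n, ne, w, e, sw, true, se)
    else f
  else if dx = 1 then
    if dy = -1 then (nw, n, true, w, e, sw, s, se)
    else if dy = 0 then (nw, n, ne, w, true, sw, s, se)
    else if dy = 1 then (nw, n, ne, w, e, sw, s, true)
    else f
  else f

-- Source B's second loop: for i in range(4), j = (k+i)%4, return moves[j] if free[j]
def pdPick (ex ey : Int) (free : List Bool) (moves : List (Int × Int)) (k : Nat) :
    List Nat → Int × Int
  | [] => (ex, ey)
  | i :: rest =>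
    let j := (k + i) % 4
    -- free[j] / moves[j]: j < 4 always, so getD is the exact list indexing
    if free.getD j false then moves.getD j (ex, ey) else pdPick ex ey free moves k rest

def proposal_direction_alt (ex : Int) (ey : Int) (elves : List (Int × Int)) (r : Int) : Int × Int :=
  let (nw, n, ne, w, e, sw, s, se) :=
    elves.foldl (pdStep ex ey) (false, false, false, false, false, false, false, false)
  let free : List Bool := [!(nw || n || ne), !(sw || s || se), !(nw || w || sw), !(ne || e || se)]
  let moves : List (Int × Int) := [(ex, ey - 1), (ex, ey + 1), (ex - 1, ey), (ex + 1, ey)]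
  let k := (PySem.Int.mod r 4).toNat   -- 0 ≤ r % 4, so toNat is exact
  pdPick ex ey free moves k [0, 1, 2, 3]

-- ===== PRECONDITION & SPEC =====
def Spec_proposal_direction (ex : Int) (ey : Int) (elves : List (Int × Int)) (r : Int) (out : Int × Int) : Prop := out = proposal_direction_alt ex ey elves r
instance (ex : Int) (ey : Int) (elves : List (Int × Int)) (r : Int) (out : Int × Int) : Decidable (Spec_proposal_direction ex ey elves r out) := by unfold Spec_proposal_direction; infer_instance

-- ===== CLAIM (what is proved, stated in full; the proofs are below) =====
def Claim_equal_proposal_direction : Prop := ∀ (ex : Int) (ey : Int) (elves : List (Int × Int)) (r : Int), Dom_proposal_direction ex ey elves r → Spec_proposal_direction ex ey elves r (proposal_direction ex ey elves r)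

-- ===== LEMMAS AND PROOFS =====
theorem pd_mod_cases (r : Int) :
    PySem.Int.mod r 4 = 0 ∨ PySem.Int.mod r 4 = 1 ∨ PySem.Int.mod r 4 = 2 ∨ PySem.Int.mod r 4 = 3 := by
  rw [PySem.Int.mod_eq_emod_of_pos (a := r) (by norm_num)]
  omega

theorem or_beq_eq {a : Bool} {p q : Int × Int} (h : p = q) : (a || (p == q)) = true := by
  simp [h]

theorem or_beq_ne {a : Bool} {p q : Int × Int} (h : p ≠ q) : (a || (p == q)) = a := by
  simp [h]

theorem pair_beq_comm (p q : Int × Int) : (p == q) = (q == p) := by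
  by_cases h : p = q
  · simp [h]
  · simp [h, Ne.symm h]

-- one step of the fold just ORs each flag with "this elf sits on that neighbor cell"
theorem pdStep_eq (ex ey : Int) (f : Bool × Bool × Bool × Bool × Bool × Bool × Bool × Bool)
    (p : Int × Int) :
    pdStep ex ey f p =
      (f.1 || (p == (ex - 1, ey - 1)), f.2.1 || (p == (ex, ey - 1)),
       f.2.2.1 || (p == (ex + 1, ey - 1)), f.2.2.2.1 || (p == (ex - 1, ey)),
       f.2.2.2.2.1 || (p == (ex + 1, ey)), f.2.2.2.2.2.1 || (p == (ex - 1, ey + 1)),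
       f.2.2.2.2.2.2.1 || (p == (ex, ey + 1)), f.2.2.2.2.2.2.2 || (p == (ex + 1, ey + 1))) := by
  obtain ⟨x, y⟩ := p
  obtain ⟨a1, a2, a3, a4, a5, a6, a7, a8⟩ := f
  simp only [pdStep]
  split_ifs <;> simp only [Prod.mk.injEq] <;>
    refine ⟨?_, ?_, ?_, ?_, ?_, ?_, ?_, ?_⟩ <;>
    (symm; first
      | exact or_beq_eq (by simp only [Prod.mk.injEq]; omega)
      | exact or_beq_ne (by simp only [ne_eq, Prod.mk.injEq, not_and]; omega))

theorem pdFlags_go (ex ey : Int) (l : List (Int × Int)) (a1 a2 a3 a4 a5 a6 a7 a8 : Bool) :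
    l.foldl (pdStep ex ey) (a1, a2, a3, a4, a5, a6, a7, a8) =
      (a1 || l.contains (ex - 1, ey - 1), a2 || l.contains (ex, ey - 1),
       a3 || l.contains (ex + 1, ey - 1), a4 || l.contains (ex - 1, ey),
       a5 || l.contains (ex + 1, ey), a6 || l.contains (ex - 1, ey + 1),
       a7 || l.contains (ex, ey + 1), a8 || l.contains (ex + 1, ey + 1)) := by
  induction l generalizing a1 a2 a3 a4 a5 a6 a7 a8 with
  | nil => simp
  | cons p t ih =>
    simp only [List.foldl_cons, pdStep_eq, ih, List.contains_cons, Bool.or_assoc,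
      Prod.mk.injEq]
    refine ⟨?_, ?_, ?_, ?_, ?_, ?_, ?_, ?_⟩ <;> rw [pair_beq_comm]

set_option maxHeartbeats 2000000 in
-- ===== VERDICT (by name: the statement is the Claim_ definition above) =====
theorem proposal_direction_spec : Claim_equal_proposal_direction := by
  intro ex ey elves r _
  unfold Spec_proposal_direction proposal_direction proposal_direction_alt
  rcases pd_mod_cases r with h | h | h | h <;> rw [h] <;>
    simp only [mvN, mvS, mvW, mvE, pdFlags_go, Bool.false_or] <;>
    (generalize elves.contains (ex - 1, ey - 1) = b1;
     generalize elves.contains (ex, ey - 1) = b2;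
     generalize elves.contains (ex + 1, ey - 1) = b3;
     generalize elves.contains (ex - 1, ey) = b4;
     generalize elves.contains (ex + 1, ey) = b5;
     generalize elves.contains (ex - 1, ey + 1) = b6;
     generalize elves.contains (ex, ey + 1) = b7;
     generalize elves.contains (ex + 1, ey + 1) = b8) <;>
    cases b1 <;> cases b2 <;> cases b3 <;> cases b4 <;>
    cases b5 <;> cases b6 <;> cases b7 <;> cases b8 <;> rfl
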